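-- pv_equiv track=rewrite | github.com/SpectralSequences/sseq | message_passing_tree/agent.py | cmdstr_to_filter_list
-- ===== SOURCE A (Python) =====
-- def cmdstr_to_filter_list(cmd):
--     # We use "__" as a standin for "." in "command filter identifiers"
--     # Just in case, convert any "__" back to "."
--     cmd = cmd.replace("__", ".") # TODO: is this a good choice?
--     result = [cmd]
--     while( (idx := cmd.rfind(".")) >= 0):
--         cmd = cmd[ : idx]
--         result.append(cmd)
--     result.append("*")
--     return result
-- ===== SOURCE B (Python) =====
-- def cmdstr_to_filter_list(cmd):
--     # We use "__" as a standin for "." in "command filter identifiers"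
--     cmd = cmd.replace("__", ".")
--     parts = cmd.split(".")
--     return [".".join(parts[:i]) for i in range(len(parts), 0, -1)] + ["*"]
-- ===== Notes on version B (the rewrite author's own statement) =====
-- stated objective: idiomatic
-- what changed: B replaces A's while-loop of repeated rfind/slice truncation at the last dot by a single tokenizing split on the dot separator followed by joining progressively shorter leading slices of the parts.
import Mathlib
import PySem

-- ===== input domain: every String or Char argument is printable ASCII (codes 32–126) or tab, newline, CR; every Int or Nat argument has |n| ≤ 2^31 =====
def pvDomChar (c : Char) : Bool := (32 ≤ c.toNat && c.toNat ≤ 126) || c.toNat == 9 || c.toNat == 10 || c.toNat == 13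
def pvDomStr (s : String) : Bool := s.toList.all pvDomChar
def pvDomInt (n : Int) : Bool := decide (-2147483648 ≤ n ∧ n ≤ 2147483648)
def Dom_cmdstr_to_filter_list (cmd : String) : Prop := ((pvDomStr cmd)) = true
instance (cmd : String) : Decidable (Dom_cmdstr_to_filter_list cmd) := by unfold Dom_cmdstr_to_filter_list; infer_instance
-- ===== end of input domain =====

-- B replaces A's repeated rfind/truncate while-loop by one split('.') followed by joining shrinking prefixes (idiomatic decomposition, same cost).


-- ===== PORT A =====
-- termination fact for A's while-loop, cited by decreasing_by: a found '.' lies at an index below the length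
theorem pvA_go_cases (s : List Char) (j : Nat) :
    PySem.Chars.rfind.go s ['.'] j = -1 ∨
    ∃ k : Nat, PySem.Chars.rfind.go s ['.'] j = (k : Int) ∧ k ≤ j ∧
      (['.'] : List Char).isPrefixOf (s.drop k) = true := by
  induction j with
  | zero =>
    rw [PySem.Chars.rfind.go.eq_def]
    by_cases h : (['.'] : List Char).isPrefixOf s = true
    · exact Or.inr ⟨0, by simp [h]⟩
    · simp at h; simp [h]
  | succ j ih =>
    rw [PySem.Chars.rfind.go.eq_def]
    by_cases h : (['.'] : List Char).isPrefixOf (s.drop (j + 1)) = true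
    · exact Or.inr ⟨j + 1, by simp [h]⟩
    · simp only [Bool.not_eq_true] at h
      simp only [h]
      rcases ih with h1 | ⟨k, h1, h2, h3⟩
      · exact Or.inl h1
      · exact Or.inr ⟨k, h1, by omega, h3⟩

theorem pvA_rfind_lt (s : List Char) (h : 0 ≤ PySem.Chars.rfind s ['.']) :
    (PySem.Chars.rfind s ['.']).toNat < s.length := by
  unfold PySem.Chars.rfind at *
  rcases pvA_go_cases s s.length with hc | ⟨k, hk, _, hpre⟩
  · omega
  · rw [hk]
    by_cases hlt : k < s.length
    · simpa using hlt
    · exfalso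
      have : s.drop k = [] := List.drop_eq_nil_iff.mpr (by omega)
      rw [this] at hpre
      simp [List.isPrefixOf] at hpre

def cmdA_go (cmd : String) (result : List String) : List String :=
  let idx := PySem.Str.rfind cmd "."
  if h : 0 ≤ idx then
    cmdA_go (PySem.Str.slice cmd none (some idx)) (result ++ [PySem.Str.slice cmd none (some idx)])
  else result
termination_by cmd.toList.length
decreasing_by
  have h' : 0 ≤ PySem.Chars.rfind cmd.toList ['.'] := by simpa [PySem.Str.rfind] using h
  have := pvA_rfind_lt cmd.toList h'
  have hdot : ("." : String).toList = ['.'] := rfl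
  simp only [PySem.Str.toList_slice, PySem.Chars.slice_eq_listSlice, PySem.Str.rfind, hdot]
  rw [PySem.List.slice_to _ h']
  simp only [List.length_take]
  omega

def cmdstr_to_filter_list (cmd : String) : List String :=
  let cmd := PySem.Str.replace cmd "__" "."
  cmdA_go cmd [cmd] ++ ["*"]

-- ===== PORT B =====
def cmdstr_to_filter_list_alt (cmd : String) : List String :=
  let cmd := PySem.Str.replace cmd "__" "."
  -- cmd.split("."): the separator is the non-empty literal ".", so split? is always `some` and getD is exact
  let parts := (PySem.Str.split? cmd ".").getD []
  (PySem.List.pyRange parts.length 0 (-1)).map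
      (fun i => PySem.Str.join "." (PySem.List.slice parts none (some i))) ++ ["*"]

-- ===== PRECONDITION & SPEC =====
def Spec_cmdstr_to_filter_list (cmd : String) (out : List String) : Prop := out = cmdstr_to_filter_list_alt cmd
instance (cmd : String) (out : List String) : Decidable (Spec_cmdstr_to_filter_list cmd out) := by unfold Spec_cmdstr_to_filter_list; infer_instance

-- ===== CLAIM (what is proved, stated in full; the proofs are below) =====
def Claim_equal_cmdstr_to_filter_list : Prop := ∀ (cmd : String), Dom_cmdstr_to_filter_list cmd → Spec_cmdstr_to_filter_list cmd (cmdstr_to_filter_list cmd)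

-- ===== LEMMAS AND PROOFS =====

-- reference split of a char list at '.' : (head piece, remaining pieces)
def pvEsp : List Char → List Char × List (List Char)
  | [] => ([], [])
  | c :: r =>
    let p := pvEsp r
    if c = '.' then ([], p.1 :: p.2) else (c :: p.1, p.2)

theorem pvSplitOn_go_eq (l : List Char) : ∀ (fuel : Nat) (cur : List Char) (acc : List (List Char)),
    l.length < fuel →
    PySem.Chars.splitOn.go ['.'] fuel l cur acc
      = acc.reverse ++ (cur.reverse ++ (pvEsp l).1) :: (pvEsp l).2 := by
  induction l with
  | nil =>
    intro fuel cur acc hf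
    cases fuel with
    | zero => omega
    | succ f => rw [PySem.Chars.splitOn.go.eq_def]; simp [pvEsp]
  | cons c rest ih =>
    intro fuel cur acc hf
    cases fuel with
    | zero => omega
    | succ f =>
      rw [PySem.Chars.splitOn.go.eq_def]
      simp only []
      by_cases hc : c = '.'
      · have hpre : (['.'] : List Char).isPrefixOf (c :: rest) = true := by
          rw [List.isPrefixOf_iff_prefix]; simp [hc]
        rw [if_pos hpre]
        have hdrop : List.drop (['.'] : List Char).length (c :: rest) = rest := by simp
        rw [hdrop, ih f [] (cur.reverse :: acc) (by simp at hf; omega)]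
        simp [pvEsp, hc]
      · have hpre : (['.'] : List Char).isPrefixOf (c :: rest) = false := by
          rw [Bool.eq_false_iff]
          intro hco
          rw [List.isPrefixOf_iff_prefix] at hco
          rw [List.cons_prefix_cons] at hco
          exact hc hco.1.symm
        rw [if_neg (by simp [hpre])]
        rw [ih f (c :: cur) acc (by simp at hf; omega)]
        simp [pvEsp, hc]

theorem pvSplit_eq (l : List Char) :
    PySem.Chars.splitOn l ['.'] = (pvEsp l).1 :: (pvEsp l).2 := by
  unfold PySem.Chars.splitOn
  rw [pvSplitOn_go_eq l (l.length + 1) [] [] (by omega)]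
  simp

theorem pvEsp_dotfree (l : List Char) :
    (('.' : Char) ∉ (pvEsp l).1) ∧ ∀ p ∈ (pvEsp l).2, ('.' : Char) ∉ p := by
  induction l with
  | nil => simp [pvEsp]
  | cons c r ih =>
    by_cases hc : c = '.'
    · subst hc
      simp only [pvEsp, ite_true]
      exact ⟨by simp, by
        intro p hp
        simp only [List.mem_cons] at hp
        rcases hp with rfl | hp
        · exact ih.1
        · exact ih.2 p hp⟩
    · simp only [pvEsp, if_neg hc]
      refine ⟨?_, ih.2⟩
      simp only [List.mem_cons, not_or]
      exact ⟨fun h => hc h.symm, ih.1⟩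

theorem pvJoin_cons (c : Char) (h : List Char) (t : List (List Char)) :
    PySem.Chars.join ['.'] ((c :: h) :: t) = c :: PySem.Chars.join ['.'] (h :: t) := by
  cases t with
  | nil => rw [PySem.Chars.join_singleton, PySem.Chars.join_singleton]
  | cons b bs => rw [PySem.Chars.join_cons_cons, PySem.Chars.join_cons_cons]; simp

theorem pvJoin_esp (l : List Char) :
    PySem.Chars.join ['.'] ((pvEsp l).1 :: (pvEsp l).2) = l := by
  induction l with
  | nil => simp [pvEsp, PySem.Chars.join_singleton]
  | cons c r ih =>
    by_cases hc : c = '.'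
    · subst hc
      simp only [pvEsp, ite_true]
      rw [PySem.Chars.join_cons_cons]
      simp [ih]
    · simp only [pvEsp, if_neg hc]
      rw [pvJoin_cons, ih]

-- join of a nonempty list with one more piece appended
theorem pvJoin_append_last (ps : List (List Char)) (hps : ps ≠ []) (z : List Char) :
    PySem.Chars.join ['.'] (ps ++ [z]) = PySem.Chars.join ['.'] ps ++ '.' :: z := by
  induction ps with
  | nil => exact absurd rfl hps
  | cons p ps ih =>
    cases ps with
    | nil =>
      simp only [List.singleton_append]
      rw [PySem.Chars.join_cons_cons, PySem.Chars.join_singleton, PySem.Chars.join_singleton]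
      simp
    | cons q qs =>
      rw [List.cons_append, List.cons_append, PySem.Chars.join_cons_cons]
      rw [PySem.Chars.join_cons_cons, ← List.cons_append, ih (by simp)]
      simp

theorem pvPrefix_iff (m : List Char) :
    ((['.'] : List Char).isPrefixOf m = true) ↔ m.head? = some '.' := by
  rw [List.isPrefixOf_iff_prefix]
  cases m with
  | nil => simp
  | cons c t =>
    simp only [List.cons_prefix_cons, List.nil_prefix, and_true, List.head?_cons, Option.some.injEq]
    exact eq_comm

theorem pvGo_neg (s : List Char) (j : Nat)
    (h : ∀ i ≤ j, (['.'] : List Char).isPrefixOf (s.drop i) = false) :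
    PySem.Chars.rfind.go s ['.'] j = -1 := by
  induction j with
  | zero =>
    rw [PySem.Chars.rfind.go.eq_def]
    have := h 0 (le_refl _)
    simp only [List.drop_zero] at this
    simp [this]
  | succ j ih =>
    rw [PySem.Chars.rfind.go.eq_def]
    have := h (j + 1) (le_refl _)
    simp only [this]
    simp only [Bool.false_eq_true, if_false]
    exact ih (fun i hi => h i (by omega))

theorem pvGo_pos (s : List Char) (j k : Nat)
    (hk : (['.'] : List Char).isPrefixOf (s.drop k) = true) (hkj : k ≤ j)
    (hmax : ∀ i, k < i → i ≤ j → (['.'] : List Char).isPrefixOf (s.drop i) = false) :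
    PySem.Chars.rfind.go s ['.'] j = (k : Int) := by
  induction j with
  | zero =>
    have hk0 : k = 0 := by omega
    subst hk0
    rw [PySem.Chars.rfind.go.eq_def]
    simp only [List.drop_zero] at hk
    simp [hk]
  | succ j ih =>
    rw [PySem.Chars.rfind.go.eq_def]
    by_cases he : k = j + 1
    · subst he; simp [hk]
    · have h1 : (['.'] : List Char).isPrefixOf (s.drop (j + 1)) = false :=
        hmax (j + 1) (by omega) (le_refl _)
      simp only [h1, Bool.false_eq_true, if_false]
      exact ih (by omega) (fun i hi hij => hmax i hi (by omega))

theorem pvRfind_neg (v : List Char) (hv : ('.' : Char) ∉ v) :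
    PySem.Chars.rfind v ['.'] = -1 := by
  unfold PySem.Chars.rfind
  apply pvGo_neg
  intro i _
  rw [Bool.eq_false_iff]
  intro hco
  rw [pvPrefix_iff, List.head?_drop] at hco
  exact hv (List.mem_of_getElem? hco)

theorem pvRfind_last (u v : List Char) (hv : ('.' : Char) ∉ v) :
    PySem.Chars.rfind (u ++ '.' :: v) ['.'] = (u.length : Int) := by
  unfold PySem.Chars.rfind
  apply pvGo_pos
  · rw [pvPrefix_iff, List.head?_drop]
    simp
  · simp
  · intro i hi _
    rw [Bool.eq_false_iff]
    intro hco
    rw [pvPrefix_iff, List.head?_drop] at hco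
    have hgi : (u ++ '.' :: v)[i]? = v[i - u.length - 1]? := by
      rw [List.getElem?_append_right (by omega)]
      have : i - u.length = (i - u.length - 1) + 1 := by omega
      rw [this]
      simp
    rw [hgi] at hco
    exact hv (List.mem_of_getElem? hco)

theorem pvGoA_spec : ∀ (n : Nat) (qs : List (List Char)) (q : List Char) (acc : List String),
    qs.length = n → (∀ p ∈ qs, ('.' : Char) ∉ p) → (('.' : Char) ∉ q) →
    cmdA_go (String.ofList (PySem.Chars.join ['.'] (qs ++ [q]))) acc
      = acc ++ (PySem.List.pyRange (qs.length : Int) 0 (-1)).map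
          (fun i => String.ofList (PySem.Chars.join ['.'] ((qs ++ [q]).take i.toNat))) := by
  intro n
  induction n with
  | zero =>
    intro qs q acc hlen _ hq
    have hqs : qs = [] := List.eq_nil_of_length_eq_zero hlen
    subst hqs
    simp only [List.nil_append, PySem.Chars.join_singleton, List.length_nil, Nat.cast_zero]
    rw [cmdA_go]
    have hr : PySem.Str.rfind (String.ofList q) "." = -1 := by
      rw [PySem.Str.rfind_eq]
      have hdot : ("." : String).toList = ['.'] := rfl
      rw [hdot, String.toList_ofList]
      exact pvRfind_neg q hq
    simp only [hr]
    rw [dif_neg (by omega)]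
    rw [PySem.List.pyRange_neg_one_eq_nil (le_refl 0)]
    simp
  | succ n ih =>
    intro qs q acc hlen hqs hq
    rcases List.eq_nil_or_concat qs with rfl | ⟨qs', q', rfl⟩
    · simp at hlen
    · simp only [List.concat_eq_append] at hlen hqs ⊢
      have hlen' : qs'.length = n := by simpa using hlen
      have hq' : ('.' : Char) ∉ q' := hqs q' (by simp)
      have hqs' : ∀ p ∈ qs', ('.' : Char) ∉ p := fun p hp => hqs p (by simp [hp])
      have hjoin : PySem.Chars.join ['.'] ((qs' ++ [q']) ++ [q])
          = PySem.Chars.join ['.'] (qs' ++ [q']) ++ '.' :: q :=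
        pvJoin_append_last _ (by simp) q
      set u := PySem.Chars.join ['.'] (qs' ++ [q']) with hu
      have hrf : PySem.Str.rfind (String.ofList (u ++ '.' :: q)) "." = (u.length : Int) := by
        rw [PySem.Str.rfind_eq]
        have hdot : ("." : String).toList = ['.'] := rfl
        rw [hdot, String.toList_ofList]
        exact pvRfind_last u q hq
      have hslice : PySem.Str.slice (String.ofList (u ++ '.' :: q)) none (some (u.length : Int))
          = String.ofList u := by
        show String.ofList (PySem.Chars.slice _ _ _) = _
        rw [PySem.Chars.slice_eq_listSlice, String.toList_ofList,
            PySem.List.slice_to _ (by omega : (0:Int) ≤ (u.length : Int))]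
        simp [List.take_left']
      rw [hjoin, cmdA_go]
      simp only [hrf]
      rw [dif_pos (Int.natCast_nonneg u.length)]
      rw [hslice]
      rw [ih qs' q' (acc ++ [String.ofList u]) hlen' hqs' hq']
      -- right-hand side
      have hlen2 : ((qs' ++ [q']).length : Int) = (qs'.length : Int) + 1 := by simp
      have h2 : (0 : Int) < (qs'.length : Int) + 1 := by linarith [Int.natCast_nonneg qs'.length]
      rw [hlen2, PySem.List.pyRange_neg_one_cons h2,
          show ((qs'.length : Int) + 1) - 1 = (qs'.length : Int) from by ring]
      rw [List.map_cons]
      have hhead : ((qs' ++ [q']) ++ [q]).take ((qs'.length : Int) + 1).toNat = qs' ++ [q'] := by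
        have h1 : ((qs'.length : Int) + 1).toNat = (qs' ++ [q']).length := by simp
        rw [h1, List.take_left]
      have htail : ∀ i ∈ PySem.List.pyRange (qs'.length : Int) 0 (-1),
          String.ofList (PySem.Chars.join ['.'] (((qs' ++ [q']) ++ [q]).take i.toNat))
            = String.ofList (PySem.Chars.join ['.'] ((qs' ++ [q']).take i.toNat)) := by
        intro i hi
        rw [PySem.List.mem_pyRange_neg_one] at hi
        rw [List.take_append_of_le_length (by simp; omega)]
      rw [List.map_congr_left htail]
      rw [hhead, ← hu]
      simp


theorem pvStrJoin (ps : List (List Char)) :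
    PySem.Str.join "." (ps.map String.ofList) = String.ofList (PySem.Chars.join ['.'] ps) := by
  show String.ofList (PySem.Chars.join ("." : String).toList (List.map String.toList (ps.map String.ofList)))
      = String.ofList (PySem.Chars.join ['.'] ps)
  have hdot : ("." : String).toList = ['.'] := rfl
  rw [hdot, List.map_map]
  congr 1
  rw [show List.map (String.toList ∘ String.ofList) ps = List.map id ps from
        List.map_congr_left (fun p _ => String.toList_ofList (l := p)),
      List.map_id]

theorem pvMain (s : String) :
    cmdA_go s [s] ++ ["*"]
      = (PySem.List.pyRange (((PySem.Str.split? s ".").getD []).length : Int) 0 (-1)).map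
          (fun i => PySem.Str.join "." (PySem.List.slice ((PySem.Str.split? s ".").getD []) none (some i))) ++ ["*"] := by
  obtain ⟨qs, q, hqq⟩ : ∃ qs q, (pvEsp s.toList).1 :: (pvEsp s.toList).2 = qs ++ [q] := by
    rcases List.eq_nil_or_concat ((pvEsp s.toList).1 :: (pvEsp s.toList).2) with h | ⟨qs, q, h⟩
    · exact absurd h (by simp)
    · exact ⟨qs, q, by simpa [List.concat_eq_append] using h⟩
  have hsplit : (PySem.Str.split? s ".").getD [] = (qs ++ [q]).map String.ofList := by
    show (Option.map (fun x => List.map String.ofList x) (PySem.Chars.split? s.toList ("." : String).toList)).getD []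
        = (qs ++ [q]).map String.ofList
    have hdot : ("." : String).toList = ['.'] := rfl
    rw [hdot]
    unfold PySem.Chars.split?
    rw [if_neg (by simp)]
    rw [pvSplit_eq, hqq]
    rfl
  have hdf := pvEsp_dotfree s.toList
  have hall : ∀ p ∈ qs ++ [q], ('.' : Char) ∉ p := by
    rw [← hqq]
    intro p hp
    rcases List.mem_cons.mp hp with rfl | hp
    · exact hdf.1
    · exact hdf.2 p hp
  have hq : ('.' : Char) ∉ q := hall q (by simp)
  have hqs : ∀ p ∈ qs, ('.' : Char) ∉ p := fun p hp => hall p (by simp [hp])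
  have hl : PySem.Chars.join ['.'] (qs ++ [q]) = s.toList := by rw [← hqq]; exact pvJoin_esp s.toList
  have hs : s = String.ofList (PySem.Chars.join ['.'] (qs ++ [q])) := by
    rw [hl, String.ofList_toList]
  have hlen : (((PySem.Str.split? s ".").getD []).length : Int) = (qs.length : Int) + 1 := by
    rw [hsplit]; simp
  have h2 : (0 : Int) < (qs.length : Int) + 1 := by linarith [Int.natCast_nonneg qs.length]
  rw [hlen, PySem.List.pyRange_neg_one_cons h2,
      show ((qs.length : Int) + 1) - 1 = (qs.length : Int) from by ring]
  rw [List.map_cons]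
  have helem : ∀ i : Int, 0 ≤ i →
      PySem.Str.join "." (PySem.List.slice ((PySem.Str.split? s ".").getD []) none (some i))
        = String.ofList (PySem.Chars.join ['.'] ((qs ++ [q]).take i.toNat)) := by
    intro i hi
    rw [hsplit, PySem.List.slice_to _ hi, ← List.map_take, pvStrJoin]
  have hhead : PySem.Str.join "." (PySem.List.slice ((PySem.Str.split? s ".").getD []) none (some ((qs.length : Int) + 1)))
      = s := by
    rw [helem _ (by linarith)]
    have h3 : ((qs.length : Int) + 1).toNat = (qs ++ [q]).length := by simp
    rw [h3, List.take_length, ← hs]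
  rw [hhead]
  have htail : ∀ i ∈ PySem.List.pyRange (qs.length : Int) 0 (-1),
      PySem.Str.join "." (PySem.List.slice ((PySem.Str.split? s ".").getD []) none (some i))
        = String.ofList (PySem.Chars.join ['.'] ((qs ++ [q]).take i.toNat)) := by
    intro i hi
    rw [PySem.List.mem_pyRange_neg_one] at hi
    exact helem i (by omega)
  rw [List.map_congr_left htail]
  conv_lhs => rw [hs]
  rw [pvGoA_spec qs.length qs q [String.ofList (PySem.Chars.join ['.'] (qs ++ [q]))] rfl hqs hq]
  rw [← hs]
  simp

-- ===== VERDICT (by name: the statement is the Claim_ definition above) =====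
theorem cmdstr_to_filter_list_spec : Claim_equal_cmdstr_to_filter_list := by
  intro cmd _
  unfold Spec_cmdstr_to_filter_list cmdstr_to_filter_list cmdstr_to_filter_list_alt
  exact pvMain (PySem.Str.replace cmd "__" ".")
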